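-- pv_equiv track=rewrite | github.com/aryan-chugh/precog_ai_math | src/generator.py | generate_transition_list
-- ===== SOURCE A (Python) =====
-- def generate_transition_list(base=5):
--     transitions = []
--     rev_transitions = {i: [] for i in range(base)}  # Initialize lists for each remainder
--
--     for i in range(base):
--         for j in range(base):
--             r1 = (i + j) % base
--             r2 = (i * j) % base
--
--             transitions.append({f'{i}+{j}': f'{r1}'})
--             transitions.append({f'{i}*{j}': f'{r2}'})
--
--             rev_transitions[r1].append(f'{i}+{j}')
--             rev_transitions[r2].append(f'{i}*{j}')
--
--     return transitions, rev_transitions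
-- ===== SOURCE B (Python) =====
-- def generate_transition_list(base=5):
--     # Flattened-index traversal: one loop over k in range(2*n*n) decodes
--     # (i, j, op) arithmetically via divmod instead of nested i,j loops, and the
--     # reverse index is kept as a positional list of buckets turned into a dict
--     # at the end, instead of a dict maintained inside the loop.
--     buckets = [[] for _ in range(base)]
--     n = len(buckets)
--     transitions = []
--     for k in range(2 * n * n):
--         q, op = divmod(k, 2)
--         i, j = divmod(q, n)
--         if op == 0:
--             expr, r = f'{i}+{j}', (i + j) % n
--         else:
--             expr, r = f'{i}*{j}', (i * j) % n
--         transitions.append({expr: f'{r}'})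
--         buckets[r].append(expr)
--     return transitions, {r: bucket for r, bucket in enumerate(buckets)}
-- ===== Notes on version B (the rewrite author's own statement) =====
-- stated objective: alternative
-- what changed: B replaces A's nested i,j loops and in-loop dict maintenance by a single flat loop over k in range(2*n*n) that decodes (i, j, op) arithmetically with divmod, appending into a positional list of buckets that is converted to the reverse-index dict only at the end via enumerate.
import Mathlib
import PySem

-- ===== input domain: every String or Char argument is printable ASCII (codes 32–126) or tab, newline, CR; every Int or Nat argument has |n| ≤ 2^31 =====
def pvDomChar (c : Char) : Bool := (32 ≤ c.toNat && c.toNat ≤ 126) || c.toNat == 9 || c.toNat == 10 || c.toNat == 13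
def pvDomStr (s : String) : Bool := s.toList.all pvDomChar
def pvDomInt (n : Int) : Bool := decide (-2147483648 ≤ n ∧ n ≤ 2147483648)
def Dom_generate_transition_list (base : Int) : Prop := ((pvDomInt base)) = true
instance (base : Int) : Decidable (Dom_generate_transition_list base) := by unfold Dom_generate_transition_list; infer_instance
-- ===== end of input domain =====

-- B traverses one flat index k in range(2*n*n), decoding (i, j, op) with divmod, and keeps the
-- reverse index as a positional list of buckets turned into a dict only at the end (objective: alternative).

-- ===== PORT A =====
def generate_transition_list (base : Int) : (List (List (String × String))) × (List (Int × List String)) :=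
  let rev0 : PySem.Dict Int (List String) :=
    (PySem.List.pyRange 0 base 1).foldl (fun d i => d.insert i []) PySem.Dict.empty
  let res :=
    (PySem.List.pyRange 0 base 1).foldl (fun s i =>
      (PySem.List.pyRange 0 base 1).foldl (fun s j =>
        let r1 := PySem.Int.mod (i + j) base
        let r2 := PySem.Int.mod (i * j) base
        let e1 := PySem.Int.toStr i ++ "+" ++ PySem.Int.toStr j
        let e2 := PySem.Int.toStr i ++ "*" ++ PySem.Int.toStr j
        (s.1 ++ [[(e1, PySem.Int.toStr r1)]] ++ [[(e2, PySem.Int.toStr r2)]],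
         (s.2.modify r1 [] (fun l => l ++ [e1])).modify r2 [] (fun l => l ++ [e2]))) s)
      (([], rev0) : List (List (String × String)) × PySem.Dict Int (List String))
  (res.1, res.2.items)

-- ===== PORT B =====
-- buckets[r].append(expr): r = q % n with n > 0 whenever the loop body runs, so 0 ≤ r < n and the
-- positional update List.modify r.toNat is exact (Python's IndexError is unreachable).
-- {r: bucket for r, bucket in enumerate(buckets)} has distinct keys 0..n-1, so the dict's
-- association list is exactly PySem.List.enumerate buckets 0.
def generate_transition_list_alt (base : Int) : (List (List (String × String))) × (List (Int × List String)) :=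
  let buckets0 : List (List String) := (PySem.List.pyRange 0 base 1).map (fun _ => ([] : List String))
  let n : Int := PySem.List.len buckets0
  let res :=
    (PySem.List.pyRange 0 (2 * n * n) 1).foldl (fun s k =>
      let q := PySem.Int.floordiv k 2
      let op := PySem.Int.mod k 2
      let i := PySem.Int.floordiv q n
      let j := PySem.Int.mod q n
      let er : String × Int :=
        if op = 0 then (PySem.Int.toStr i ++ "+" ++ PySem.Int.toStr j, PySem.Int.mod (i + j) n)
        else (PySem.Int.toStr i ++ "*" ++ PySem.Int.toStr j, PySem.Int.mod (i * j) n)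
      (s.1 ++ [[(er.1, PySem.Int.toStr er.2)]], s.2.modify er.2.toNat (fun l => l ++ [er.1])))
      (([], buckets0) : List (List (String × String)) × List (List String))
  (res.1, PySem.List.enumerate res.2 0)

-- ===== PRECONDITION & SPEC =====
def Spec_generate_transition_list (base : Int) (out : (List (List (String × String))) × (List (Int × List String))) : Prop := out = generate_transition_list_alt base
instance (base : Int) (out : (List (List (String × String))) × (List (Int × List String))) : Decidable (Spec_generate_transition_list base out) := by unfold Spec_generate_transition_list; infer_instance

-- ===== CLAIM (what is proved, stated in full; the proofs are below) =====
def Claim_equal_generate_transition_list : Prop := ∀ (base : Int), Dom_generate_transition_list base → Spec_generate_transition_list base (generate_transition_list base)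

-- ===== LEMMAS AND PROOFS =====

-- the (expression, result) pair stream, in A's (i, j, add-then-mul) order, over Nat indices
def pvPairs (m : Nat) : List (String × Int) :=
  (List.range m).flatMap (fun (i : Nat) =>
    (List.range m).flatMap (fun (j : Nat) =>
      [(PySem.Int.toStr (i : Int) ++ "+" ++ PySem.Int.toStr (j : Int), PySem.Int.mod ((i : Int) + (j : Int)) (m : Int)),
       (PySem.Int.toStr (i : Int) ++ "*" ++ PySem.Int.toStr (j : Int), PySem.Int.mod ((i : Int) * (j : Int)) (m : Int))]))

-- the per-pair step A performs on its joint (transitions, reverse-dict) state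
def pvStepA (s : List (List (String × String)) × PySem.Dict Int (List String)) (p : String × Int) :
    List (List (String × String)) × PySem.Dict Int (List String) :=
  (s.1 ++ [[(p.1, PySem.Int.toStr p.2)]], s.2.modify p.2 [] (fun l => l ++ [p.1]))

-- the per-pair step B performs on its joint (transitions, buckets) state
def pvStepB (s : List (List (String × String)) × List (List String)) (p : String × Int) :
    List (List (String × String)) × List (List String) :=
  (s.1 ++ [[(p.1, PySem.Int.toStr p.2)]], s.2.modify p.2.toNat (fun l => l ++ [p.1]))

-- B's divmod decoding of a flat index k into its (expression, result) pair
def pvDecode (n : Int) (k : Int) : String × Int :=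
  if PySem.Int.mod k 2 = 0 then
    (PySem.Int.toStr (PySem.Int.floordiv (PySem.Int.floordiv k 2) n) ++ "+" ++
       PySem.Int.toStr (PySem.Int.mod (PySem.Int.floordiv k 2) n),
     PySem.Int.mod (PySem.Int.floordiv (PySem.Int.floordiv k 2) n + PySem.Int.mod (PySem.Int.floordiv k 2) n) n)
  else
    (PySem.Int.toStr (PySem.Int.floordiv (PySem.Int.floordiv k 2) n) ++ "*" ++
       PySem.Int.toStr (PySem.Int.mod (PySem.Int.floordiv k 2) n),
     PySem.Int.mod (PySem.Int.floordiv (PySem.Int.floordiv k 2) n * PySem.Int.mod (PySem.Int.floordiv k 2) n) n)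

-- the common value both programs compute
def pvCommon (m : Nat) : (List (List (String × String))) × (List (Int × List String)) :=
  ((pvPairs m).map (fun p => [(p.1, PySem.Int.toStr p.2)]),
   (List.range m).map (fun (k : Nat) =>
     ((k : Int), ((pvPairs m).filter (fun p => p.2 == (k : Int))).map (·.1))))

-- pyRange 0 m is the casted List.range
lemma pvRangeCast (m : Nat) :
    PySem.List.pyRange 0 (m : Int) 1 = (List.range m).map (fun (k : Nat) => (k : Int)) := by
  rw [PySem.List.pyRange_one]
  simp only [Int.sub_zero, Int.toNat_natCast]
  exact List.map_congr_left (fun k _ => by omega)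

-- a loop doing two pvStepA's per element is the pvStepA-fold over the two-element blocks
lemma pvFoldl_two {α : Type} (g1 g2 : α → String × Int) (l : List α)
    (s : List (List (String × String)) × PySem.Dict Int (List String)) :
    l.foldl (fun s x => pvStepA (pvStepA s (g1 x)) (g2 x)) s
      = (l.flatMap (fun x => [g1 x, g2 x])).foldl pvStepA s := by
  induction l generalizing s with
  | nil => rfl
  | cons a t ih => simp [List.flatMap_cons, ih]

-- a loop running the pvStepA-fold over blocks is the pvStepA-fold over their concatenation
lemma pvFoldl_flat {α : Type} (g : α → List (String × Int)) (l : List α)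
    (s : List (List (String × String)) × PySem.Dict Int (List String)) :
    l.foldl (fun s x => (g x).foldl pvStepA s) s = (l.flatMap g).foldl pvStepA s := by
  induction l generalizing s with
  | nil => rfl
  | cons a t ih => simp [List.flatMap_cons, ih]

-- flatMap congruence under membership
lemma pvFlatMap_congr {α β : Type} (l : List α) (f g : α → List β) (h : ∀ x ∈ l, f x = g x) :
    l.flatMap f = l.flatMap g := by
  induction l with
  | nil => rfl
  | cons a t ih =>
    simp only [List.flatMap_cons, h a (by simp), ih (fun x hx => h x (by simp [hx]))]

-- range(a*c) decomposed into a blocks of c consecutive numbers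
lemma pvRange_mul (a c : Nat) :
    List.range (a * c) = (List.range a).flatMap (fun i => (List.range c).map (fun t => c * i + t)) := by
  induction a with
  | zero => simp
  | succ a ih =>
    have h : (a + 1) * c = a * c + c := by ring
    rw [h, List.range_add, ih, List.range_succ, List.flatMap_append]
    simp [Nat.mul_comm]

-- arithmetic of the divmod decoding
lemma pvDiv2 (a : Nat) : PySem.Int.floordiv ((2 * a : Nat) : Int) 2 = (a : Int) := by
  have h := PySem.Int.floordiv_natCast (2 * a) 2
  rw [Nat.mul_div_cancel_left a (by norm_num)] at h
  exact_mod_cast h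

lemma pvDiv2' (a : Nat) : PySem.Int.floordiv ((2 * a + 1 : Nat) : Int) 2 = (a : Int) := by
  have h := PySem.Int.floordiv_natCast (2 * a + 1) 2
  rw [show (2 * a + 1) / 2 = a from by omega] at h
  exact_mod_cast h

lemma pvMod2 (a : Nat) : PySem.Int.mod ((2 * a : Nat) : Int) 2 = 0 := by
  have h := PySem.Int.mod_natCast (2 * a) 2
  rw [show (2 * a) % 2 = 0 from by omega] at h
  exact_mod_cast h

lemma pvMod2' (a : Nat) : PySem.Int.mod ((2 * a + 1 : Nat) : Int) 2 = 1 := by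
  have h := PySem.Int.mod_natCast (2 * a + 1) 2
  rw [show (2 * a + 1) % 2 = 1 from by omega] at h
  exact_mod_cast h

lemma pvDivM (m i j : Nat) (hj : j < m) :
    PySem.Int.floordiv ((m * i + j : Nat) : Int) (m : Int) = (i : Int) := by
  have h := PySem.Int.floordiv_natCast (m * i + j) m
  rw [Nat.mul_add_div (by omega), Nat.div_eq_of_lt hj, Nat.add_zero] at h
  exact h

lemma pvModM (m i j : Nat) (hj : j < m) :
    PySem.Int.mod ((m * i + j : Nat) : Int) (m : Int) = (j : Int) := by
  have h := PySem.Int.mod_natCast (m * i + j) m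
  rw [Nat.mul_add_mod, Nat.mod_eq_of_lt hj] at h
  exact h

lemma pvDecode_add (m i j : Nat) (hj : j < m) :
    pvDecode (m : Int) ((2 * (m * i + j) : Nat) : Int)
      = (PySem.Int.toStr (i : Int) ++ "+" ++ PySem.Int.toStr (j : Int),
         PySem.Int.mod ((i : Int) + (j : Int)) (m : Int)) := by
  unfold pvDecode
  rw [pvMod2 (m * i + j), pvDiv2 (m * i + j), pvDivM m i j hj, pvModM m i j hj]
  simp

lemma pvDecode_mul (m i j : Nat) (hj : j < m) :
    pvDecode (m : Int) ((2 * (m * i + j) + 1 : Nat) : Int)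
      = (PySem.Int.toStr (i : Int) ++ "*" ++ PySem.Int.toStr (j : Int),
         PySem.Int.mod ((i : Int) * (j : Int)) (m : Int)) := by
  unfold pvDecode
  rw [pvMod2' (m * i + j), pvDiv2' (m * i + j), pvDivM m i j hj, pvModM m i j hj]
  norm_num

-- every pair produced at Nat indices i j below m has its result in [0, m)
lemma pvPairs_snd_bounds (m : Nat) (p : String × Int) (hp : p ∈ pvPairs m) :
    0 ≤ p.2 ∧ p.2 < (m : Int) := by
  simp [pvPairs] at hp
  obtain ⟨i, hi, j, hj, hm⟩ := hp
  have hm0 : (0 : Int) < (m : Int) := by exact_mod_cast Nat.lt_of_le_of_lt (Nat.zero_le i) hi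
  have h2 : p.2 = PySem.Int.mod ((i : Int) + j) m ∨ p.2 = PySem.Int.mod ((i : Int) * j) m := by
    rcases hm with h | h
    · left; rw [h]
    · right; rw [h]
  rcases h2 with h | h <;> rw [h] <;>
    exact ⟨PySem.Int.mod_nonneg _ hm0, PySem.Int.mod_lt _ hm0⟩

-- decoding the flat index stream yields exactly the pair stream
lemma pvDecode_range (m : Nat) :
    (List.range (2 * m * m)).map (fun (k : Nat) => pvDecode (m : Int) (k : Int)) = pvPairs m := by
  rw [show 2 * m * m = m * (2 * m) from by ring, pvRange_mul m (2 * m), List.map_flatMap]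
  unfold pvPairs
  refine pvFlatMap_congr _ _ _ (fun i _ => ?_)
  rw [List.map_map,
      show List.range (2 * m) = (List.range m).flatMap (fun j => [2 * j, 2 * j + 1]) from by
        rw [show 2 * m = m * 2 from by ring, pvRange_mul m 2]
        refine pvFlatMap_congr _ _ _ (fun j _ => ?_)
        simp [List.range_succ],
      List.map_flatMap]
  refine pvFlatMap_congr _ _ _ (fun j hj => ?_)
  simp only [List.mem_range] at hj
  simp only [List.map_cons, List.map_nil, Function.comp_apply]
  rw [show 2 * m * i + 2 * j = 2 * (m * i + j) from by ring,
      show 2 * m * i + (2 * j + 1) = 2 * (m * i + j) + 1 from by ring,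
      pvDecode_add m i j hj, pvDecode_mul m i j hj]

-- modifying one slot of a range-shaped map pointwise
lemma pvModifyMapRange {α : Type} (m t : Nat) (g : Nat → α) (f : α → α) :
    ((List.range m).map g).modify t f
      = (List.range m).map (fun k => if k = t then f (g k) else g k) := by
  apply List.ext_getElem
  · simp
  · intro k h1 h2
    rw [List.getElem_modify]
    simp only [List.length_modify, List.length_map, List.length_range] at h1
    simp only [List.getElem_map, List.getElem_range]
    by_cases hk : t = k
    · simp [hk]
    · rw [if_neg hk, if_neg (by omega)]

-- buckets fold: positional appends over a range-shaped accumulator compute the groupings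
lemma pvBucketFold (m : Nat) (ps : List (String × Int)) (g : Nat → List String)
    (h : ∀ p ∈ ps, 0 ≤ p.2 ∧ p.2 < (m : Int)) :
    ps.foldl (fun L p => L.modify p.2.toNat (fun l => l ++ [p.1])) ((List.range m).map g)
      = (List.range m).map (fun k => g k ++ (ps.filter (fun p => p.2 == (k : Int))).map (·.1)) := by
  induction ps generalizing g with
  | nil => simp
  | cons p ps ih =>
    have hp := h p (by simp)
    rw [List.foldl_cons, pvModifyMapRange m p.2.toNat g _,
        ih _ (fun q hq => h q (by simp [hq]))]
    refine List.map_congr_left (fun k hk => ?_)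
    simp only [List.mem_range] at hk
    by_cases hkt : k = p.2.toNat
    · have hbeq : (p.2 == (k : Int)) = true := by
        simp only [beq_iff_eq]
        omega
      rw [List.filter_cons, if_pos hbeq, List.map_cons, if_pos hkt]
      simp [List.append_assoc]
    · have hbeq : ¬ ((p.2 == (k : Int)) = true) := by
        simp only [beq_iff_eq]
        omega
      rw [List.filter_cons, if_neg hbeq, if_neg hkt]

-- s.update(xs) is s when everything in xs is already present
lemma pvUpdateSelf {s : PySem.Set Int} {xs : List Int} (h : ∀ x ∈ xs, x ∈ s) :
    PySem.Set.update s xs = s := by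
  induction xs generalizing s with
  | nil => rfl
  | cons a t ih =>
    rw [PySem.Set.update_cons, PySem.Set.add_of_mem (h a (by simp))]
    exact ih (fun x hx => h x (by simp [hx]))

-- A's reverse dict, characterised: items = the groupings over keys 0..m-1 in insertion order
lemma pvRevA (m : Nat) :
    ((pvPairs m).foldl (fun d p => d.modify p.2 [] (fun l => l ++ [p.1]))
      ((PySem.List.pyRange 0 (m : Int) 1).foldl (fun d i => d.insert i []) PySem.Dict.empty)).items
      = (List.range m).map (fun (k : Nat) =>
          ((k : Int), ((pvPairs m).filter (fun p => p.2 == (k : Int))).map (·.1))) := by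
  set R := PySem.List.pyRange 0 (m : Int) 1 with hR
  set rev0 := R.foldl (fun d i => d.insert i []) PySem.Dict.empty with hrev0
  have hitems0 : rev0.items = R.map (fun i => (i, ([] : List String))) := by
    have h := PySem.Dict.items_foldl_insert_fresh R (fun i => i) (fun _ => ([] : List String))
      PySem.Dict.empty (fun a _ => by simp [PySem.Dict.contains_empty])
      (by simpa using PySem.List.nodup_pyRange_one 0 (m : Int))
    simpa using h
  have hkeys0 : rev0.keys = R := by
    have h1 : rev0.keys = (R.map (fun i => (i, ([] : List String)))).map Prod.fst := by
      rw [← hitems0]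
      rfl
    rw [h1, List.map_map, show (Prod.fst ∘ fun (i : Int) => (i, ([] : List String))) = id from rfl,
        List.map_id]
  have hnodup0 : rev0.keys.Nodup := by rw [hkeys0]; exact PySem.List.nodup_pyRange_one _ _
  set D := (pvPairs m).foldl (fun d p => d.modify p.2 [] (fun l => l ++ [p.1])) rev0 with hD
  have hmemR : ∀ p ∈ pvPairs m, p.2 ∈ R := by
    intro p hp
    have hb := pvPairs_snd_bounds m p hp
    rw [hR, PySem.List.mem_pyRange_one]
    exact ⟨hb.1, hb.2⟩
  have hkeysD : D.keys = R := by
    have h := PySem.Dict.keys_foldl_modify_key (pvPairs m) (fun p => p.2) []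
      (fun _ p => fun l => l ++ [p.1]) rev0
    rw [hD, h, hkeys0]
    refine pvUpdateSelf (fun x hx => ?_)
    obtain ⟨q, hq, rfl⟩ := List.mem_map.1 hx
    exact hmemR q hq
  have hnodupD : D.keys.Nodup := by rw [hkeysD]; exact PySem.List.nodup_pyRange_one _ _
  have hget0 : ∀ r ∈ R, rev0.getD r [] = [] := by
    intro r hr
    exact PySem.Dict.getD_of_mem_items rev0
      (by rw [hitems0]; exact List.mem_map_of_mem hr) hnodup0 []
  have hgetD : ∀ r, D.getD r [] = rev0.getD r [] ++ ((pvPairs m).filter (fun p => p.2 == r)).map (·.1) := by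
    intro r
    have hsw : D = ((pvPairs m).map Prod.swap).foldl
        (fun d p => d.modify p.1 [] (fun l => l ++ [p.2])) rev0 := by
      rw [List.foldl_map]
      rfl
    rw [hsw, PySem.Dict.getD_foldl_modify_append]
    congr 1
    rw [List.filter_map, List.map_map]
    rfl
  have hfin : D.items = D.keys.map (fun k => (k, D.getD k [])) :=
    PySem.Dict.items_eq_map_keys D hnodupD []
  rw [hfin, hkeysD, hR, pvRangeCast, List.map_map]
  refine List.map_congr_left (fun k hk => ?_)
  simp only [List.mem_range] at hk
  have hkR : ((k : Nat) : Int) ∈ R := by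
    rw [hR, PySem.List.mem_pyRange_one]
    constructor <;> omega
  simp only [Function.comp_apply]
  rw [hgetD, hget0 _ hkR]
  simp

-- enumerate of a map over range pairs each index with its image
lemma pvEnumerate_map_range {α : Type} (m : Nat) (g : Nat → α) :
    PySem.List.enumerate ((List.range m).map g) 0 = (List.range m).map (fun (k : Nat) => ((k : Int), g k)) := by
  apply List.ext_getElem
  · simp [PySem.List.length_enumerate]
  · intro k h1 h2
    simp [PySem.List.getElem_enumerate]

-- A at a nonnegative argument computes the common value
lemma pvA_eq (m : Nat) : generate_transition_list (m : Int) = pvCommon m := by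
  unfold generate_transition_list
  have hA : (PySem.List.pyRange 0 (m : Int) 1).foldl (fun s i =>
      (PySem.List.pyRange 0 (m : Int) 1).foldl (fun s j =>
        (s.1 ++ [[(PySem.Int.toStr i ++ "+" ++ PySem.Int.toStr j, PySem.Int.toStr (PySem.Int.mod (i + j) (m : Int)))]]
             ++ [[(PySem.Int.toStr i ++ "*" ++ PySem.Int.toStr j, PySem.Int.toStr (PySem.Int.mod (i * j) (m : Int)))]],
         (s.2.modify (PySem.Int.mod (i + j) (m : Int)) [] (fun l => l ++ [PySem.Int.toStr i ++ "+" ++ PySem.Int.toStr j])).modify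
           (PySem.Int.mod (i * j) (m : Int)) [] (fun l => l ++ [PySem.Int.toStr i ++ "*" ++ PySem.Int.toStr j]))) s)
      (([], (PySem.List.pyRange 0 (m : Int) 1).foldl (fun d i => d.insert i []) PySem.Dict.empty)
        : List (List (String × String)) × PySem.Dict Int (List String))
      = (pvPairs m).foldl pvStepA
        ([], (PySem.List.pyRange 0 (m : Int) 1).foldl (fun d i => d.insert i []) PySem.Dict.empty) := by
    have hP : (PySem.List.pyRange 0 (m : Int) 1).flatMap (fun i =>
        (PySem.List.pyRange 0 (m : Int) 1).flatMap (fun j =>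
          [(PySem.Int.toStr i ++ "+" ++ PySem.Int.toStr j, PySem.Int.mod (i + j) (m : Int)),
           (PySem.Int.toStr i ++ "*" ++ PySem.Int.toStr j, PySem.Int.mod (i * j) (m : Int))])) = pvPairs m := by
      rw [pvRangeCast, List.flatMap_map]
      unfold pvPairs
      refine pvFlatMap_congr _ _ _ (fun i _ => ?_)
      rw [List.flatMap_map]
      try rfl
    rw [← hP, ← pvFoldl_flat]
    refine PySem.List.foldl_congr_mem _ _ _ _ (fun s i hi => ?_)
    rw [← pvFoldl_two (fun j => (PySem.Int.toStr i ++ "+" ++ PySem.Int.toStr j, PySem.Int.mod (i + j) (m : Int)))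
                      (fun j => (PySem.Int.toStr i ++ "*" ++ PySem.Int.toStr j, PySem.Int.mod (i * j) (m : Int)))]
    rfl
  simp only [hA]
  rw [show pvStepA = (fun (s : List (List (String × String)) × PySem.Dict Int (List String)) (p : String × Int) =>
        (s.1 ++ [[(p.1, PySem.Int.toStr p.2)]], s.2.modify p.2 [] (fun l => l ++ [p.1]))) from rfl]
  rw [PySem.List.foldl_prod_mk (f := fun ts (p : String × Int) => ts ++ [[(p.1, PySem.Int.toStr p.2)]])
        (g := fun d (p : String × Int) => PySem.Dict.modify d p.2 [] (fun l => l ++ [p.1]))]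
  unfold pvCommon
  refine Prod.ext ?_ ?_
  · dsimp only
    rw [PySem.List.foldl_append_singleton_eq_map]
    simp
  · dsimp only
    exact pvRevA m

-- B at a nonnegative argument computes the common value
lemma pvB_eq (m : Nat) : generate_transition_list_alt (m : Int) = pvCommon m := by
  unfold generate_transition_list_alt
  have hlen : PySem.List.len ((PySem.List.pyRange 0 (m : Int) 1).map (fun _ => ([] : List String))) = (m : Int) := by
    simp [PySem.List.len_eq, PySem.List.length_pyRange_one]
  simp only [hlen]
  have hbody : (fun (s : List (List (String × String)) × List (List String)) (k : Int) =>
      let q := PySem.Int.floordiv k 2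
      let op := PySem.Int.mod k 2
      let i := PySem.Int.floordiv q (m : Int)
      let j := PySem.Int.mod q (m : Int)
      let er : String × Int :=
        if op = 0 then (PySem.Int.toStr i ++ "+" ++ PySem.Int.toStr j, PySem.Int.mod (i + j) (m : Int))
        else (PySem.Int.toStr i ++ "*" ++ PySem.Int.toStr j, PySem.Int.mod (i * j) (m : Int))
      (s.1 ++ [[(er.1, PySem.Int.toStr er.2)]], s.2.modify er.2.toNat (fun l => l ++ [er.1])))
      = (fun s k => pvStepB s (pvDecode (m : Int) k)) := rfl
  simp only [hbody]
  have hks : PySem.List.pyRange 0 (2 * (m : Int) * (m : Int)) 1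
      = (List.range (2 * m * m)).map (fun (k : Nat) => (k : Int)) := by
    rw [PySem.List.pyRange_one]
    rw [show ((2 * (m : Int) * (m : Int)) - 0).toNat = 2 * m * m from by
      rw [show (2 * (m : Int) * (m : Int)) - 0 = ((2 * m * m : Nat) : Int) from by push_cast; ring]
      exact Int.toNat_natCast _]
    exact List.map_congr_left (fun k _ => by omega)
  rw [hks, pvRangeCast, List.foldl_map]
  have hfold : ∀ (init : List (List (String × String)) × List (List String)),
      (List.range (2 * m * m)).foldl (fun s (k : Nat) => pvStepB s (pvDecode (m : Int) (k : Int))) init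
        = (pvPairs m).foldl pvStepB init := by
    intro init
    conv_rhs => rw [← pvDecode_range m]
    rw [List.foldl_map]
  rw [hfold]
  rw [show pvStepB = (fun (s : List (List (String × String)) × List (List String)) (p : String × Int) =>
        (s.1 ++ [[(p.1, PySem.Int.toStr p.2)]], s.2.modify p.2.toNat (fun l => l ++ [p.1]))) from rfl]
  rw [PySem.List.foldl_prod_mk (f := fun ts (p : String × Int) => ts ++ [[(p.1, PySem.Int.toStr p.2)]])
        (g := fun (L : List (List String)) (p : String × Int) => L.modify p.2.toNat (fun l => l ++ [p.1]))]
  unfold pvCommon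
  refine Prod.ext ?_ ?_
  · dsimp only
    rw [PySem.List.foldl_append_singleton_eq_map]
    simp
  · dsimp only
    rw [List.map_map, pvBucketFold m (pvPairs m) _ (pvPairs_snd_bounds m), pvEnumerate_map_range]
    exact List.map_congr_left (fun k _ => by simp)

-- ===== VERDICT (by name: the statement is the Claim_ definition above) =====
theorem generate_transition_list_spec : Claim_equal_generate_transition_list := by
  intro base _
  unfold Spec_generate_transition_list
  by_cases hb : base ≤ 0
  · unfold generate_transition_list generate_transition_list_alt
    rw [PySem.List.pyRange_one_eq_nil hb]
    rfl
  · have hbm : base = ((base.toNat : Nat) : Int) := by omega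
    rw [hbm, pvA_eq, pvB_eq]
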